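-- pv_equiv track=rewrite | github.com/natea/FloodRisk | src/validation/report_generator.py | _generate_recommendations_section
-- ===== SOURCE A (Python) =====
-- from typing import Dict, List, Optional, Tuple, Union, Any
--
-- def _generate_recommendations_section(report_data: Dict) -> str:
--     """Generate recommendations section"""
--
--     recommendations = report_data.get("recommendations", [])
--
--     rec_html = """
--     <div class="recommendations">
--         <h2>Recommendations</h2>
--     """
--
--     if not recommendations:
--         rec_html += "<p>No specific recommendations generated.</p>"
--     else:
--         # Group by priority
--         high_priority = [r for r in recommendations if r["priority"] == "High"]
--         medium_priority = [r for r in recommendations if r["priority"] == "Medium"]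
--         low_priority = [r for r in recommendations if r["priority"] == "Low"]
--
--         for priority_group, title in [
--             (high_priority, "High Priority"),
--             (medium_priority, "Medium Priority"),
--             (low_priority, "Low Priority"),
--         ]:
--             if priority_group:
--                 rec_html += f"<h3>{title}</h3><div class='recommendation-list'>"
--
--                 for rec in priority_group:
--                     rec_html += f"""
--                     <div class="recommendation-item {rec['priority'].lower()}-priority">
--                         <div class="rec-category">{rec['category']}</div>
--                         <div class="rec-issue"><strong>Issue:</strong> {rec['issue']}</div>
--                         <div class="rec-action"><strong>Recommendation:</strong> {rec['recommendation']}</div>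
--                         <div class="rec-metric"><strong>Supporting Metric:</strong> {rec['metric']}</div>
--                     </div>
--                     """
--
--                 rec_html += "</div>"
--
--     rec_html += "</div>"
--     return rec_html
-- ===== SOURCE B (Python) =====
-- def _generate_recommendations_section(report_data):
--     """Generate recommendations section (stable sort by priority rank, then one
--     scan that opens a new section whenever the rank changes)."""
--
--     recommendations = report_data.get("recommendations", [])
--
--     rec_html = """
--     <div class="recommendations">
--         <h2>Recommendations</h2>
--     """
--
--     if not recommendations:
--         rec_html += "<p>No specific recommendations generated.</p>"
--     else:
--         RANK = {"High": 0, "Medium": 1, "Low": 2}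
--         TITLES = ["High Priority", "Medium Priority", "Low Priority"]
--
--         ordered = sorted(
--             (r for r in recommendations if r["priority"] in RANK),
--             key=lambda r: RANK[r["priority"]],
--         )
--
--         prev = None
--         for rec in ordered:
--             rank = RANK[rec["priority"]]
--             if rank != prev:
--                 if prev is not None:
--                     rec_html += "</div>"
--                 rec_html += f"<h3>{TITLES[rank]}</h3><div class='recommendation-list'>"
--                 prev = rank
--
--             rec_html += f"""
--                     <div class="recommendation-item {rec['priority'].lower()}-priority">
--                         <div class="rec-category">{rec['category']}</div>
--                         <div class="rec-issue"><strong>Issue:</strong> {rec['issue']}</div>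
--                         <div class="rec-action"><strong>Recommendation:</strong> {rec['recommendation']}</div>
--                         <div class="rec-metric"><strong>Supporting Metric:</strong> {rec['metric']}</div>
--                     </div>
--                     """
--
--         if prev is not None:
--             rec_html += "</div>"
--
--     rec_html += "</div>"
--     return rec_html
-- ===== Notes on version B (the rewrite author's own statement) =====
-- stated objective: alternative
-- what changed: Instead of A's three separate filter passes rendered group by group, B stably sorts the recommendations once by a numeric priority rank and renders them in a single scan that opens a new <h3> section whenever the rank changes; HTML output is byte-for-byte identical (stability preserves within-group order).
import Mathlib
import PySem

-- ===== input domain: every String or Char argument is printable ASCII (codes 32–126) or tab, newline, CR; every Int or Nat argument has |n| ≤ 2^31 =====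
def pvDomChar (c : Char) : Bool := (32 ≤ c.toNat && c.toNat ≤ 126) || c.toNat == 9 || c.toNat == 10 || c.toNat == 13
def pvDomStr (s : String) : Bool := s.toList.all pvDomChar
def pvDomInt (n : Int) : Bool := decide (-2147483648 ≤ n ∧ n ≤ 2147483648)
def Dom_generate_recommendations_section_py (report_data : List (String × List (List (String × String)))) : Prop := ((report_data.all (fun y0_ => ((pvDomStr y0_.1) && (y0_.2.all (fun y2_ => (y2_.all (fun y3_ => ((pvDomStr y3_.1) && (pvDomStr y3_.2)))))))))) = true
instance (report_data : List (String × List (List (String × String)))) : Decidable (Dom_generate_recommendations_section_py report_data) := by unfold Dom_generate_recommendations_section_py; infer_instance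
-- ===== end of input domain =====

-- B replaces A's three filter passes rendered group by group by ONE stable sort on a numeric
-- priority rank followed by ONE scan that opens a section whenever the rank changes; the HTML
-- emitted is byte-for-byte identical (objective: alternative).

-- shared helpers: Python first-match dict lookup (value of r[k]; Pre_ guarantees the key is
-- present wherever the Python reads it, so the "" default is never observed) and the literal
-- per-item f-string, identical in A's and B's Python sources.
def pvRget (r : List (String × String)) (k : String) : String :=
  (((r.find? (fun p => p.1 == k)).map (fun p => p.2)).getD "")

def pvHeader : String :=
  "\n    <div class=\"recommendations\">\n        <h2>Recommendations</h2>\n    "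

def pvRecItemHtml (r : List (String × String)) : String :=
  "\n                    <div class=\"recommendation-item " ++ PySem.Str.lower (pvRget r "priority") ++
  "-priority\">\n                        <div class=\"rec-category\">" ++ pvRget r "category" ++
  "</div>\n                        <div class=\"rec-issue\"><strong>Issue:</strong> " ++ pvRget r "issue" ++
  "</div>\n                        <div class=\"rec-action\"><strong>Recommendation:</strong> " ++ pvRget r "recommendation" ++
  "</div>\n                        <div class=\"rec-metric\"><strong>Supporting Metric:</strong> " ++ pvRget r "metric" ++
  "</div>\n                    </div>\n                    "

-- ===== PORT A =====
def generate_recommendations_section_py (report_data : List (String × List (List (String × String)))) : String :=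
  let recommendations := (((report_data.find? (fun p => p.1 == "recommendations")).map (fun p => p.2)).getD [])
  let recHtml := pvHeader
  let recHtml :=
    if recommendations.isEmpty then
      recHtml ++ "<p>No specific recommendations generated.</p>"
    else
      let high := recommendations.filter (fun r => pvRget r "priority" == "High")
      let med := recommendations.filter (fun r => pvRget r "priority" == "Medium")
      let low := recommendations.filter (fun r => pvRget r "priority" == "Low")
      [(high, "High Priority"), (med, "Medium Priority"), (low, "Low Priority")].foldl
        (fun acc gt =>
          if gt.1.isEmpty then acc
          else
            (gt.1.foldl (fun a r => a ++ pvRecItemHtml r)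
              (acc ++ "<h3>" ++ gt.2 ++ "</h3><div class='recommendation-list'>")) ++ "</div>")
        recHtml
  recHtml ++ "</div>"

-- ===== PORT B =====
-- RANK[p]: 0/1/2 for the three known priorities (only ever applied after the membership filter)
def pvRank (p : String) : Nat :=
  if p == "High" then 0 else if p == "Medium" then 1 else 2

def pvTitles : List String := ["High Priority", "Medium Priority", "Low Priority"]

-- the loop body of B's single scan: state = (rec_html, prev)
def pvScanStep (st : String × Option Nat) (r : List (String × String)) : String × Option Nat :=
  let rank := pvRank (pvRget r "priority")
  let st :=
    if st.2 == some rank then st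
    else
      ((if st.2.isSome then st.1 ++ "</div>" else st.1) ++
        "<h3>" ++ pvTitles.getD rank "" ++ "</h3><div class='recommendation-list'>", some rank)
  (st.1 ++ pvRecItemHtml r, st.2)

def generate_recommendations_section_py_alt (report_data : List (String × List (List (String × String)))) : String :=
  let recommendations := (((report_data.find? (fun p => p.1 == "recommendations")).map (fun p => p.2)).getD [])
  let recHtml := pvHeader
  let recHtml :=
    if recommendations.isEmpty then
      recHtml ++ "<p>No specific recommendations generated.</p>"
    else
      let ordered := PySem.List.sorted
        (recommendations.filter (fun r => ["High", "Medium", "Low"].contains (pvRget r "priority")))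
        (fun r => pvRank (pvRget r "priority"))
      let st := ordered.foldl pvScanStep (recHtml, none)
      if st.2.isSome then st.1 ++ "</div>" else st.1
  recHtml ++ "</div>"

-- ===== PRECONDITION & SPEC =====
-- Pre_ excludes exactly the inputs on which the Python A raises KeyError: a recommendation
-- without a "priority" key, or one whose priority is High/Medium/Low but which lacks one of
-- the four keys the item template reads.
def Pre_generate_recommendations_section_py (report_data : List (String × List (List (String × String)))) : Prop :=
  ((((report_data.find? (fun p => p.1 == "recommendations")).map (fun p => p.2)).getD []).all
    (fun r =>
      (r.any (fun p => p.1 == "priority")) &&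
      (!(pvRget r "priority" == "High" || pvRget r "priority" == "Medium" || pvRget r "priority" == "Low") ||
        ((r.any (fun p => p.1 == "category")) && (r.any (fun p => p.1 == "issue")) &&
         (r.any (fun p => p.1 == "recommendation")) && (r.any (fun p => p.1 == "metric")))))) = true
instance (report_data : List (String × List (List (String × String)))) : Decidable (Pre_generate_recommendations_section_py report_data) := by unfold Pre_generate_recommendations_section_py; infer_instance

def pvWitness_generate_recommendations_section_py : (List (String × List (List (String × String)))) :=
  [("recommendations", [[("priority", "High"), ("category", "c"), ("issue", "i"), ("recommendation", "r"), ("metric", "m")],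
                        [("priority", "Other")]])]

def Spec_generate_recommendations_section_py (report_data : List (String × List (List (String × String)))) (out : String) : Prop := out = generate_recommendations_section_py_alt report_data
instance (report_data : List (String × List (List (String × String)))) (out : String) : Decidable (Spec_generate_recommendations_section_py report_data out) := by unfold Spec_generate_recommendations_section_py; infer_instance

-- ===== CLAIM (what is proved, stated in full; the proofs are below) =====
def Claim_equal_generate_recommendations_section_py : Prop := ∀ (report_data : List (String × List (List (String × String)))), Dom_generate_recommendations_section_py report_data → Pre_generate_recommendations_section_py report_data → Spec_generate_recommendations_section_py report_data (generate_recommendations_section_py report_data)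

-- ===== LEMMAS AND PROOFS =====

-- insertBy skips a prefix it must not go before
theorem pv_insertBy_append {α : Type} (before : α → α → Bool) (x : α) (l1 l2 : List α)
    (h : ∀ y ∈ l1, before x y = false) :
    PySem.List.insertBy before x (l1 ++ l2) = l1 ++ PySem.List.insertBy before x l2 := by
  induction l1 with
  | nil => simp
  | cons a t ih =>
    have ha : before x a = false := h a (by simp)
    simp [PySem.List.insertBy, ha, ih (fun y hy => h y (by simp [hy]))]

-- insertBy goes to the front when it must go before everything
theorem pv_insertBy_front {α : Type} (before : α → α → Bool) (x : α) (l : List α)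
    (h : ∀ y ∈ l, before x y = true) :
    PySem.List.insertBy before x l = x :: l := by
  cases l with
  | nil => simp [PySem.List.insertBy]
  | cons a t => simp [PySem.List.insertBy, h a (by simp)]

-- a stable sort with keys in {0,1,2} is the concatenation of the three filters, in key order
theorem pv_sorted_eq_filters {α : Type} (key : α → Nat) (xs : List α)
    (h : ∀ x ∈ xs, key x ≤ 2) :
    PySem.List.sorted xs key =
      xs.filter (fun x => key x == 0) ++ xs.filter (fun x => key x == 1) ++
        xs.filter (fun x => key x == 2) := by
  induction xs using List.reverseRecOn with
  | nil => simp [PySem.List.sorted_eq_foldl_insertBy]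
  | append_singleton l a ih =>
    have hl : ∀ x ∈ l, key x ≤ 2 := fun x hx => h x (by simp [hx])
    have ha : key a ≤ 2 := h a (by simp)
    have hfold :
        PySem.List.sorted (l ++ [a]) key =
          PySem.List.insertBy (fun p q => decide (key p < key q)) a (PySem.List.sorted l key) := by
      simp [PySem.List.sorted_eq_foldl_insertBy]
    rw [hfold, ih hl]
    have hF0 : ∀ y ∈ l.filter (fun x => key x == 0), key y = 0 := by
      intro y hy; simpa using (List.of_mem_filter hy)
    have hF1 : ∀ y ∈ l.filter (fun x => key x == 1), key y = 1 := by
      intro y hy; simpa using (List.of_mem_filter hy)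
    have hF2 : ∀ y ∈ l.filter (fun x => key x == 2), key y = 2 := by
      intro y hy; simpa using (List.of_mem_filter hy)
    interval_cases hk : (key a)
    · -- key a = 0 : skip block 0, insert before blocks 1,2
      rw [List.append_assoc,
        pv_insertBy_append _ _ _ _ (by intro y hy; simp [hF0 y hy, hk]),
        pv_insertBy_front _ _ _ (by
          intro y hy
          rcases List.mem_append.mp hy with hy1 | hy2
          · simp [hF1 y hy1, hk]
          · simp [hF2 y hy2, hk])]
      simp [List.filter_append, hk, List.append_assoc]
    · -- key a = 1 : skip blocks 0,1, insert before block 2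
      rw [show l.filter (fun x => key x == 0) ++ l.filter (fun x => key x == 1) ++ l.filter (fun x => key x == 2)
            = (l.filter (fun x => key x == 0) ++ l.filter (fun x => key x == 1)) ++ l.filter (fun x => key x == 2) by rw [List.append_assoc],
        pv_insertBy_append _ _ _ _ (by
          intro y hy
          rcases List.mem_append.mp hy with hy0 | hy1
          · simp [hF0 y hy0, hk]
          · simp [hF1 y hy1, hk]),
        pv_insertBy_front _ _ _ (by intro y hy; simp [hF2 y hy, hk])]
      simp [List.filter_append, hk, List.append_assoc]
    · -- key a = 2 : goes at the very end
      rw [PySem.List.insertBy_of_forall_not_before _ _ _ (by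
        intro y hy
        rcases List.mem_append.mp hy with hy01 | hy2
        · rcases List.mem_append.mp hy01 with hy0 | hy1
          · simp [hF0 y hy0, hk]
          · simp [hF1 y hy1, hk]
        · simp [hF2 y hy2, hk])]
      simp [List.filter_append, hk, List.append_assoc]

-- pull the accumulator out of an item-rendering fold
theorem pv_items_shift (g : List (List (String × String))) (s t : String) :
    g.foldl (fun a r => a ++ pvRecItemHtml r) (s ++ t) =
      s ++ g.foldl (fun a r => a ++ pvRecItemHtml r) t := by
  induction g generalizing t with
  | nil => simp
  | cons r g ih => simp [List.foldl_cons, String.append_assoc, ih]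

-- the scan over a run of constant rank, starting inside that run: items only
theorem pv_scan_run (g : List (List (String × String))) (k : Nat)
    (hg : ∀ r ∈ g, pvRank (pvRget r "priority") = k) (s : String) :
    g.foldl pvScanStep (s, some k) =
      (g.foldl (fun a r => a ++ pvRecItemHtml r) s, some k) := by
  induction g generalizing s with
  | nil => simp
  | cons r g ih =>
    have hr := hg r (by simp)
    simp only [List.foldl_cons, pvScanStep, hr, beq_self_eq_true, if_pos]
    exact ih (fun x hx => hg x (by simp [hx])) _

-- the scan over a whole nonempty block of rank k, entered with prev ≠ some k
theorem pv_scan_block (g : List (List (String × String))) (k : Nat)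
    (hg : ∀ r ∈ g, pvRank (pvRget r "priority") = k) (hne : g ≠ [])
    (s : String) (prev : Option Nat) (hprev : prev ≠ some k) :
    g.foldl pvScanStep (s, prev) =
      (g.foldl (fun a r => a ++ pvRecItemHtml r)
        ((if prev.isSome then s ++ "</div>" else s) ++
          "<h3>" ++ pvTitles.getD k "" ++ "</h3><div class='recommendation-list'>"), some k) := by
  cases g with
  | nil => exact absurd rfl hne
  | cons r g =>
    have hr := hg r (by simp)
    have hb : (prev == some k) = false := by simp [hprev]
    simp only [List.foldl_cons, pvScanStep, hr, hb, Bool.false_eq_true, if_false]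
    exact pv_scan_run g k (fun x hx => hg x (by simp [hx])) _

-- ===== VERDICT (by name: the statement is the Claim_ definition above) =====
theorem generate_recommendations_section_py_spec : Claim_equal_generate_recommendations_section_py := by
  intro report_data _ _
  unfold Spec_generate_recommendations_section_py
  unfold generate_recommendations_section_py generate_recommendations_section_py_alt
  set recs := (((report_data.find? (fun p => p.1 == "recommendations")).map (fun p => p.2)).getD []) with hrecs
  by_cases hemp : recs.isEmpty
  · simp [hemp]
  · simp only [hemp, if_neg, Bool.false_eq_true, if_false]
    -- identify B's sorted list with A's three filters
    have hkey : ∀ r ∈ recs.filter (fun r => ["High", "Medium", "Low"].contains (pvRget r "priority")),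
        pvRank (pvRget r "priority") ≤ 2 := by
      intro r _; unfold pvRank; split_ifs <;> omega
    rw [pv_sorted_eq_filters _ _ hkey]
    have hF : ∀ (i : Nat) (v : String), pvRank v = i →
        (∀ r : List (String × String),
          ((pvRank (pvRget r "priority") == i) && (["High", "Medium", "Low"].contains (pvRget r "priority")))
            = (pvRget r "priority" == v)) →
        (recs.filter (fun r => ["High", "Medium", "Low"].contains (pvRget r "priority"))).filter
            (fun r => pvRank (pvRget r "priority") == i)
          = recs.filter (fun r => pvRget r "priority" == v) := by
      intro i v _ hp
      rw [List.filter_filter]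
      exact List.filter_congr (fun r _ => hp r)
    have hp0 : ∀ r : List (String × String),
        ((pvRank (pvRget r "priority") == 0) && (["High", "Medium", "Low"].contains (pvRget r "priority")))
          = (pvRget r "priority" == "High") := by
      intro r
      by_cases h0 : pvRget r "priority" = "High" <;>
        by_cases h1 : pvRget r "priority" = "Medium" <;>
          by_cases h2 : pvRget r "priority" = "Low" <;> simp_all [pvRank]
    have hp1 : ∀ r : List (String × String),
        ((pvRank (pvRget r "priority") == 1) && (["High", "Medium", "Low"].contains (pvRget r "priority")))
          = (pvRget r "priority" == "Medium") := by
      intro r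
      by_cases h0 : pvRget r "priority" = "High" <;>
        by_cases h1 : pvRget r "priority" = "Medium" <;>
          by_cases h2 : pvRget r "priority" = "Low" <;> simp_all [pvRank]
    have hp2 : ∀ r : List (String × String),
        ((pvRank (pvRget r "priority") == 2) && (["High", "Medium", "Low"].contains (pvRget r "priority")))
          = (pvRget r "priority" == "Low") := by
      intro r
      by_cases h0 : pvRget r "priority" = "High" <;>
        by_cases h1 : pvRget r "priority" = "Medium" <;>
          by_cases h2 : pvRget r "priority" = "Low" <;> simp_all [pvRank]
    rw [hF 0 "High" rfl hp0, hF 1 "Medium" rfl hp1, hF 2 "Low" rfl hp2]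
    set F0 := recs.filter (fun r => pvRget r "priority" == "High") with hF0d
    set F1 := recs.filter (fun r => pvRget r "priority" == "Medium") with hF1d
    set F2 := recs.filter (fun r => pvRget r "priority" == "Low") with hF2d
    have hr0 : ∀ r ∈ F0, pvRank (pvRget r "priority") = 0 := by
      intro r hr; have := List.of_mem_filter hr; simp_all [pvRank]
    have hr1 : ∀ r ∈ F1, pvRank (pvRget r "priority") = 1 := by
      intro r hr; have := List.of_mem_filter hr; simp_all [pvRank]
    have hr2 : ∀ r ∈ F2, pvRank (pvRget r "priority") = 2 := by
      intro r hr; have := List.of_mem_filter hr; simp_all [pvRank]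
    -- both sides by case analysis on which blocks are empty
    simp only [List.foldl_cons, List.foldl_nil, List.foldl_append]
    by_cases h0 : F0 = [] <;> by_cases h1 : F1 = [] <;> by_cases h2 : F2 = [] <;>
      simp only [h0, h1, h2, List.foldl_nil, List.isEmpty_iff] <;>
      [skip;
       rw [pv_scan_block F2 2 hr2 h2 _ none (by simp)];
       rw [pv_scan_block F1 1 hr1 h1 _ none (by simp)];
       rw [pv_scan_block F1 1 hr1 h1 _ none (by simp), pv_scan_block F2 2 hr2 h2 _ (some 1) (by simp)];
       rw [pv_scan_block F0 0 hr0 h0 _ none (by simp)];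
       rw [pv_scan_block F0 0 hr0 h0 _ none (by simp), pv_scan_block F2 2 hr2 h2 _ (some 0) (by simp)];
       rw [pv_scan_block F0 0 hr0 h0 _ none (by simp), pv_scan_block F1 1 hr1 h1 _ (some 0) (by simp)];
       rw [pv_scan_block F0 0 hr0 h0 _ none (by simp), pv_scan_block F1 1 hr1 h1 _ (some 0) (by simp),
           pv_scan_block F2 2 hr2 h2 _ (some 1) (by simp)]] <;>
      simp [h0, h1, h2, pvTitles, pv_items_shift, String.append_assoc]
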